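-- pv_equiv track=rewrite | github.com/easternpillar/AlgorithmTraining | Programmers/Practice Coding Test/Binary Search/Level 3/1.py | solution
-- ===== SOURCE A (Python) =====
-- def solution(budgets, M):
--     answer = 0
--     length = len(budgets)
--     idx = 0
--     budgets.sort()
--
--     while True:
--         q = M // (length - idx)
--
--         if budgets[idx] >= q:
--             return q
--         else:
--             while budgets[idx] <= q:
--                 M -= budgets[idx]
--                 idx += 1
--
--                 if idx >= length:
--                     return budgets[idx - 1]
--
--     return answer
-- ===== SOURCE B (Python) =====
-- def solution(budgets, M):
--     budgets.sort()
--     n = len(budgets)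
--     # prefix sums: pre[i] = sum of the i smallest budgets
--     pre = [0]
--     s = 0
--     for b in budgets:
--         s += b
--         pre.append(s)
--     idx = 0
--     while True:
--         q = M // (n - idx)
--         if budgets[idx] >= q:
--             return q
--         # binary search for the first position after idx whose budget exceeds q
--         lo, hi = idx, n
--         while lo < hi:
--             mid = (lo + hi) // 2
--             if q < budgets[mid]:
--                 hi = mid
--             else:
--                 lo = mid + 1
--         # grant that whole block fully, in one step
--         M -= pre[lo] - pre[idx]
--         idx = lo
--         if idx >= n:
--             return budgets[-1]
-- ===== Notes on version B (the rewrite author's own statement) =====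
-- stated objective: alternative
-- what changed: A's inner while loop that deducts budgets one element at a time is replaced by prefix sums computed once plus an index binary search that finds the whole affordable block and deducts it in one step.
import Mathlib
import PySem

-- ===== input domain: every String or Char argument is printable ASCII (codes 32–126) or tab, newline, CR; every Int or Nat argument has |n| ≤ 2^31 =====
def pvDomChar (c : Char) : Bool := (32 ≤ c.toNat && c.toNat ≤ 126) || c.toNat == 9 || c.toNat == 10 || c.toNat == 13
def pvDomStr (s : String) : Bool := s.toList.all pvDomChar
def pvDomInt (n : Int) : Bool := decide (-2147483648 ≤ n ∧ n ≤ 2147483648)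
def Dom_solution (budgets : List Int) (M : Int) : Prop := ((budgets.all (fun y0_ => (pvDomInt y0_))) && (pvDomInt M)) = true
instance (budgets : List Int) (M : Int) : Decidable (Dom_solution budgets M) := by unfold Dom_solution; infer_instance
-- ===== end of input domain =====

-- B replaces A's element-by-element inner deduction loop by prefix sums plus an index binary
-- search that grants each affordable block in one step; both sort `budgets` in place (the
-- equivalence proved is about the return value; the mutation is identical).
-- The Nat `fuel` arguments below are totality guards only: they are always called large enough
-- that the fuel-exhausted branch is never reached.

-- ===== PORT A =====
-- the inner `while budgets[idx] <= q:` loop; `.inl (M, idx)` = loop exited, `.inr a` = `return budgets[idx-1]`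
def solInner (fuel : Nat) (s : List Int) (length q M idx : Int) : (Int × Int) ⊕ Int :=
  match fuel with
  | 0 => .inl (M, idx)
  | fuel + 1 =>
    if (PySem.List.pyGet? s idx).getD 0 ≤ q then
      if idx + 1 ≥ length then .inr ((PySem.List.pyGet? s (idx + 1 - 1)).getD 0)
      else solInner fuel s length q (M - (PySem.List.pyGet? s idx).getD 0) (idx + 1)
    else .inl (M, idx)

-- the outer `while True:` loop
def solOuter (fuel : Nat) (s : List Int) (length M idx : Int) : Int :=
  match fuel with
  | 0 => 0
  | fuel + 1 =>
    if (PySem.List.pyGet? s idx).getD 0 ≥ PySem.Int.floordiv M (length - idx) then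
      PySem.Int.floordiv M (length - idx)
    else
      match solInner ((length - idx).toNat + 1) s length (PySem.Int.floordiv M (length - idx)) M idx with
      | .inr a => a
      | .inl (M', i') => solOuter fuel s length M' i'

def solution (budgets : List Int) (M : Int) : Int :=
  let length := (budgets.length : Int)
  let s := PySem.List.sorted budgets (fun x => x) false
  solOuter (budgets.length + 1) s length M 0

-- ===== PORT B =====
-- hand-written binary search from Source B: first position in [lo, hi) whose budget exceeds q
def bSearch (fuel : Nat) (s : List Int) (q lo hi : Int) : Int :=
  match fuel with
  | 0 => lo
  | fuel + 1 =>
    if lo < hi then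
      if q < (PySem.List.pyGet? s (PySem.Int.floordiv (lo + hi) 2)).getD 0 then
        bSearch fuel s q lo (PySem.Int.floordiv (lo + hi) 2)
      else bSearch fuel s q (PySem.Int.floordiv (lo + hi) 2 + 1) hi
    else lo

-- prefix sums, as built by Source B's `pre = [0]; for b in budgets: s += b; pre.append(s)`
def bPrefix (budgets : List Int) : List Int :=
  (budgets.foldl (fun (st : List Int × Int) b => (st.1 ++ [st.2 + b], st.2 + b)) ([0], 0)).1

-- the outer `while True:` loop of Source B
def bLoop (fuel : Nat) (s pre : List Int) (n M idx : Int) : Int :=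
  match fuel with
  | 0 => 0
  | fuel + 1 =>
    if (PySem.List.pyGet? s idx).getD 0 ≥ PySem.Int.floordiv M (n - idx) then
      PySem.Int.floordiv M (n - idx)
    else
      if bSearch ((n - idx).toNat + 1) s (PySem.Int.floordiv M (n - idx)) idx n ≥ n then
        (PySem.List.pyGet? s (-1)).getD 0
      else
        bLoop fuel s pre n
          (M - ((PySem.List.pyGet? pre (bSearch ((n - idx).toNat + 1) s (PySem.Int.floordiv M (n - idx)) idx n)).getD 0
                - (PySem.List.pyGet? pre idx).getD 0))
          (bSearch ((n - idx).toNat + 1) s (PySem.Int.floordiv M (n - idx)) idx n)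

def solution_alt (budgets : List Int) (M : Int) : Int :=
  let s := PySem.List.sorted budgets (fun x => x) false
  let n := (budgets.length : Int)
  bLoop (budgets.length + 1) s (bPrefix s) n M 0

-- ===== PRECONDITION & SPEC =====
-- Pre_ excludes exactly the empty list, on which both A and B raise ZeroDivisionError (M // 0).
def Pre_solution (budgets : List Int) (_M : Int) : Prop := budgets ≠ []
instance (budgets : List Int) (M : Int) : Decidable (Pre_solution budgets M) := by unfold Pre_solution; infer_instance
def pvWitness_solution : List Int × Int := ([120, 110, 140, 150], 485)
def Spec_solution (budgets : List Int) (M : Int) (out : Int) : Prop := out = solution_alt budgets M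
instance (budgets : List Int) (M : Int) (out : Int) : Decidable (Spec_solution budgets M out) := by unfold Spec_solution; infer_instance

-- ===== CLAIM (what is proved, stated in full; the proofs are below) =====
def Claim_equal_solution : Prop := ∀ (budgets : List Int) (M : Int), Dom_solution budgets M → Pre_solution budgets M → Spec_solution budgets M (solution budgets M)

-- ===== LEMMAS AND PROOFS =====

theorem bSearch_bounds (s : List Int) (q : Int) :
    ∀ (fuel : Nat) (lo hi : Int), (hi - lo).toNat < fuel →
      lo ≤ bSearch fuel s q lo hi ∧ (lo ≤ hi → bSearch fuel s q lo hi ≤ hi) := by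
  intro fuel
  induction fuel with
  | zero => intro lo hi h; omega
  | succ fuel ih =>
    intro lo hi hfu
    rw [bSearch]
    split
    · have h1 := (PySem.Int.le_floordiv_iff_mul_le (a := lo + hi) (b := 2) (q := lo) (by omega)).mpr (by omega)
      have h2 := (PySem.Int.floordiv_lt_iff_lt_mul (a := lo + hi) (b := 2) (q := hi) (by omega)).mpr (by omega)
      split
      · have := ih lo (PySem.Int.floordiv (lo + hi) 2) (by omega)
        exact ⟨this.1, fun _ => by omega⟩
      · have := ih (PySem.Int.floordiv (lo + hi) 2 + 1) hi (by omega)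
        exact ⟨by omega, fun _ => this.2 (by omega)⟩
    · exact ⟨le_refl _, fun _ => by omega⟩

theorem bSearch_spec (s : List Int) (q : Int) :
    ∀ (fuel : Nat) (lo hi : Int), (hi - lo).toNat < fuel →
      (lo < bSearch fuel s q lo hi → ¬ q < (PySem.List.pyGet? s (bSearch fuel s q lo hi - 1)).getD 0) ∧
      (bSearch fuel s q lo hi < hi → q < (PySem.List.pyGet? s (bSearch fuel s q lo hi)).getD 0) := by
  intro fuel
  induction fuel with
  | zero => intro lo hi h; omega
  | succ fuel ih =>
    intro lo hi hfu
    rw [bSearch]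
    split
    · have h1 := (PySem.Int.le_floordiv_iff_mul_le (a := lo + hi) (b := 2) (q := lo) (by omega)).mpr (by omega)
      have h2 := (PySem.Int.floordiv_lt_iff_lt_mul (a := lo + hi) (b := 2) (q := hi) (by omega)).mpr (by omega)
      split
      · have hih := ih lo (PySem.Int.floordiv (lo + hi) 2) (by omega)
        have hb := bSearch_bounds s q fuel lo (PySem.Int.floordiv (lo + hi) 2) (by omega)
        refine ⟨hih.1, fun hlt => ?_⟩
        rcases lt_or_eq_of_le (hb.2 (by omega)) with h' | h'
        · exact hih.2 h'
        · rw [h']; assumption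
      · have hih := ih (PySem.Int.floordiv (lo + hi) 2 + 1) hi (by omega)
        have hb := bSearch_bounds s q fuel (PySem.Int.floordiv (lo + hi) 2 + 1) hi (by omega)
        refine ⟨fun hlt => ?_, hih.2⟩
        rcases lt_or_eq_of_le hb.1 with h' | h'
        · exact hih.1 h'
        · rw [← h']; simpa using (by assumption : ¬ q < (PySem.List.pyGet? s (PySem.Int.floordiv (lo + hi) 2)).getD 0)
    · exact ⟨fun h => by omega, fun h => by omega⟩

-- the running-sum list preS l a: successive partial sums starting from a
def preS : List Int → Int → List Int
  | [], _ => []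
  | b :: t, a => (a + b) :: preS t (a + b)

theorem foldl_preS (l : List Int) :
    ∀ (acc : List Int) (a : Int),
      (l.foldl (fun (st : List Int × Int) b => (st.1 ++ [st.2 + b], st.2 + b)) (acc, a)).1 = acc ++ preS l a := by
  induction l with
  | nil => intro acc a; simp [preS]
  | cons b t ih =>
    intro acc a
    simp only [List.foldl_cons, preS]
    rw [ih]
    simp

theorem length_preS (l : List Int) : ∀ a : Int, (preS l a).length = l.length := by
  induction l with
  | nil => intro a; simp [preS]
  | cons b t ih => intro a; simp [preS, ih]

theorem preS_getElem (l : List Int) :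
    ∀ (a : Int) (k : Nat) (h : k < l.length),
      (preS l a)[k]'(by rw [length_preS]; exact h) = a + (l.take (k + 1)).sum := by
  induction l with
  | nil => intro a k h; simp at h
  | cons b t ih =>
    intro a k h
    cases k with
    | zero => simp [preS]
    | succ k =>
      simp only [preS, List.getElem_cons_succ, List.take_succ_cons, List.sum_cons]
      rw [ih (a + b) k (by simpa using h)]
      ring

-- pre[i] for 0 ≤ i ≤ len, as a partial sum of the sorted list
theorem bPrefix_get (s : List Int) (i : Int) (h0 : 0 ≤ i) (h1 : i ≤ (s.length : Int)) :
    (PySem.List.pyGet? (bPrefix s) i).getD 0 = (s.take i.toNat).sum := by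
  have hpre : bPrefix s = 0 :: preS s 0 := by
    unfold bPrefix
    have := foldl_preS s [0] 0
    simpa using this
  rw [hpre, PySem.List.pyGet?_of_nonneg _ h0]
  cases hk : i.toNat with
  | zero => simp
  | succ k =>
    have hk' : k < s.length := by omega
    rw [List.getElem?_cons_succ, List.getElem?_eq_getElem (by rw [length_preS]; exact hk')]
    simp [preS_getElem s 0 k hk']

-- the inner loop of A, characterised against the block boundary j
theorem solInner_to (s : List Int) (q j : Int)
    (hjn : j ≤ (s.length : Int))
    (hlt : ∀ k : Nat, (k : Int) < j → (s[k]?).getD 0 ≤ q)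
    (hgt : j < (s.length : Int) → q < (s[j.toNat]?).getD 0) :
    ∀ (fuel : Nat) (M i : Int), (j - i).toNat < fuel →
      0 ≤ i → i ≤ j → (i = j → j < (s.length : Int)) →
      solInner fuel s (s.length : Int) q M i =
        if j ≥ (s.length : Int) then .inr ((PySem.List.pyGet? s (-1)).getD 0)
        else .inl (M - ((s.take j.toNat).sum - (s.take i.toNat).sum), j) := by
  intro fuel
  induction fuel with
  | zero => intro M i h; omega
  | succ fuel ih =>
    intro M i hfu hi0 hij hedge
    rcases lt_or_eq_of_le hij with hlt' | heq
    · -- i < j: s[i] ≤ q, the loop takes a step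
      have hiN : i.toNat < s.length := by omega
      have hgeti : (PySem.List.pyGet? s i).getD 0 = s[i.toNat] := by
        rw [PySem.List.pyGet?_of_nonneg _ hi0, List.getElem?_eq_getElem hiN]; rfl
      have hle : (PySem.List.pyGet? s i).getD 0 ≤ q := by
        rw [hgeti]
        have := hlt i.toNat (by omega)
        rwa [List.getElem?_eq_getElem hiN] at this
      rw [solInner, if_pos hle]
      split
      · -- idx + 1 ≥ length: i = length - 1, hence j = length
        rw [if_pos (by omega)]
        have hidx : i + 1 - 1 = i := by omega
        rw [hidx, hgeti, PySem.List.pyGet?_neg_one]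
        have hgl : s.getLast?.getD 0 = s[i.toNat] := by
          rw [List.getLast?_eq_getElem?, List.getElem?_eq_getElem (show s.length - 1 < s.length by omega)]
          simp only [Option.getD_some]
          congr 1
          omega
        rw [hgl]
      · -- step to i + 1
        rw [ih _ (i + 1) (by omega) (by omega) (by omega) (by omega)]
        split
        · rfl
        · have h1 : (i + 1).toNat = i.toNat + 1 := by omega
          rw [hgeti, h1, List.sum_take_succ s i.toNat hiN]
          congr 2
          ring
    · -- i = j < length: s[j] > q, the loop exits immediately
      have hjN : j < (s.length : Int) := hedge heq
      have hgt' := hgt hjN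
      rw [List.getElem?_eq_getElem (by omega)] at hgt'
      rw [solInner, if_neg, if_neg (by omega)]
      · rw [heq]
        congr 2
        ring
      · rw [heq, PySem.List.pyGet?_of_nonneg _ (by omega), List.getElem?_eq_getElem (by omega)]
        simpa using hgt'

-- the two outer loops agree, for any sorted s with its prefix-sum table
theorem loop_eq (budgets : List Int) :
    ∀ (fuel : Nat) (M idx : Int),
      (((PySem.List.sorted budgets (fun x => x) false).length : Int) - idx).toNat < fuel →
      0 ≤ idx → idx < ((PySem.List.sorted budgets (fun x => x) false).length : Int) →
      solOuter fuel (PySem.List.sorted budgets (fun x => x) false) ((PySem.List.sorted budgets (fun x => x) false).length : Int) M idx =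
      bLoop fuel (PySem.List.sorted budgets (fun x => x) false) (bPrefix (PySem.List.sorted budgets (fun x => x) false)) ((PySem.List.sorted budgets (fun x => x) false).length : Int) M idx := by
  intro fuel
  induction fuel with
  | zero => intro M idx h; omega
  | succ fuel ih =>
    intro M idx hfu h0 h1
    set s := PySem.List.sorted budgets (fun x => x) false with hsdef
    set n := (s.length : Int) with hndef
    rw [solOuter, bLoop]
    set q := PySem.Int.floordiv M (n - idx) with hq
    by_cases hge : (PySem.List.pyGet? s idx).getD 0 ≥ q
    · rw [if_pos hge, if_pos hge]
    · rw [if_neg hge, if_neg hge]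
      set j := bSearch ((n - idx).toNat + 1) s q idx n with hj
      have hb1 := (bSearch_bounds s q ((n - idx).toNat + 1) idx n (by omega)).1
      have hb2 := (bSearch_bounds s q ((n - idx).toNat + 1) idx n (by omega)).2 (by omega)
      have hsp := bSearch_spec s q ((n - idx).toNat + 1) idx n (by omega)
      have hgeti : (PySem.List.pyGet? s idx).getD 0 = (s[idx.toNat]?).getD 0 := by
        rw [PySem.List.pyGet?_of_nonneg _ h0]
      -- idx < j, since s[idx] ≤ q
      have hij : idx < j := by
        rcases lt_or_eq_of_le hb1 with h' | h'
        · exact h'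
        · exfalso
          have := hsp.2 (by omega)
          rw [← h', PySem.List.pyGet?_of_nonneg _ h0] at this
          rw [hgeti] at hge
          omega
      -- everything strictly before j is ≤ q
      have hlt : ∀ k : Nat, (k : Int) < j → (s[k]?).getD 0 ≤ q := by
        intro k hk
        have hkN : k < s.length := by omega
        have hj1 := hsp.1 hij
        have hj1N : (j - 1).toNat < s.length := by omega
        rw [PySem.List.pyGet?_of_nonneg _ (by omega), List.getElem?_eq_getElem hj1N] at hj1
        have hmono : s[k]'hkN ≤ s[(j - 1).toNat]'hj1N := by
          exact PySem.List.sorted_id_getElem_mono budgets (by omega) hj1N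
        rw [List.getElem?_eq_getElem hkN]
        simp only [Option.getD_some] at hj1 ⊢
        omega
      have hgt : j < n → q < (s[j.toNat]?).getD 0 := by
        intro hjn
        have := hsp.2 hjn
        rw [PySem.List.pyGet?_of_nonneg _ (by omega)] at this
        exact this
      have hinner := solInner_to s q j hb2 hlt hgt ((n - idx).toNat + 1) M idx (by omega) h0 (by omega) (by omega)
      rw [hinner]
      by_cases hjn : j ≥ n
      · rw [if_pos hjn, if_pos hjn]
      · rw [if_neg hjn, if_neg hjn]
        rw [bPrefix_get s j (by omega) (by omega), bPrefix_get s idx (by omega) (by omega)]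
        exact ih _ j (by omega) (by omega) (by omega)

-- ===== VERDICT (by name: the statement is the Claim_ definition above) =====
theorem solution_spec : Claim_equal_solution := by
  intro budgets M _ hpre
  unfold Spec_solution solution solution_alt
  simp only []
  have hlen : (budgets.length : Int) = ((PySem.List.sorted budgets (fun x => x) false).length : Int) := by
    rw [PySem.List.length_sorted]
  have hne : budgets.length ≠ 0 := fun h => hpre (List.eq_nil_of_length_eq_zero h)
  rw [hlen]
  exact loop_eq budgets (budgets.length + 1) M 0 (by omega) (by omega) (by rw [← hlen]; omega)
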